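-- pv_equiv track=rewrite | github.com/Gaoyagi/Space-Man | spaceMan.py | is_guess_in_word
-- ===== SOURCE A (Python) =====
-- def is_guess_in_word(guess, secret_word, letters_guessed, wrong):
--     '''
--     A function to check if the guessed letter is in the secret word
--     Args:
--         guess (string): The letter the player guessed this round
--         secret_word (string): The secret word
--     Returns:
--         bool: True if the guess is in the secret_word, False otherwise
--     '''
--     #TODO: check if the letter guess is in the secret word
--     correct = False
--     length = len(secret_word)
--     for index in range(length):
--         if guess == secret_word[index]:
--             letters_guessed[index] = guess
--             correct = True
--     if not correct:
--         wrong.append(guess)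
--     return correct
-- ===== SOURCE B (Python) =====
-- def is_guess_in_word(guess, secret_word, letters_guessed, wrong):
--     # index the word once: group positions by character, then one lookup decides everything
--     positions = {}
--     for i, ch in enumerate(secret_word):
--         positions.setdefault(ch, []).append(i)
--     hits = positions.get(guess, [])
--     for i in hits:
--         letters_guessed[i] = guess
--     if not hits:
--         wrong.append(guess)
--     return bool(hits)
-- ===== Notes on version B (the rewrite author's own statement) =====
-- stated objective: alternative
-- what changed: Instead of comparing the guess against every character with a mutable flag, B builds a character-to-positions dictionary of the word once and a single dict lookup yields both the hit positions to mark and the return value (truthiness of the position list); the guess is never compared to a character.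
import Mathlib
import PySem

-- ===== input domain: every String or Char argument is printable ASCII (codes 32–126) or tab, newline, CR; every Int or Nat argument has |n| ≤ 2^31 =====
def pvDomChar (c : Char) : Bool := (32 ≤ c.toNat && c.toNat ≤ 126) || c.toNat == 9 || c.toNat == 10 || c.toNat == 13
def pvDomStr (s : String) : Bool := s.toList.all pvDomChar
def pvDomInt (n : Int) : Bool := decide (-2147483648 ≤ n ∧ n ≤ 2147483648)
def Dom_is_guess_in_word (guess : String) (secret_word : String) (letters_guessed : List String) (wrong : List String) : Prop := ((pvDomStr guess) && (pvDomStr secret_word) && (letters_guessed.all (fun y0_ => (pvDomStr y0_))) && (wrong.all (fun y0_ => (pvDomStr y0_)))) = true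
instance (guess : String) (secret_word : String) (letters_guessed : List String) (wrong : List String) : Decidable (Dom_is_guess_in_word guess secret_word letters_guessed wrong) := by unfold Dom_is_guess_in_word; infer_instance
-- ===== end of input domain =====

-- B replaces A's per-index comparison loop with a mutable flag by a character→positions
-- dictionary built once from the word; a single dictionary lookup yields the positions to
-- mark and the return value. Both Pythons mutate `letters_guessed`/`wrong` in place
-- identically; the equivalence proved here is about the RETURN value only (the ports
-- carry the `letters_guessed` updates as local state but return just the flag).

-- ===== PORT A =====
def is_guess_in_word (guess : String) (secret_word : String) (letters_guessed : List String) (wrong : List String) : Bool :=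
  let length : Int := PySem.Str.len secret_word
  let st :=
    (PySem.List.pyRange 0 length 1).foldl
      (fun (st : List String × Bool) index =>
        -- `secret_word[index]` is in range for every index of range(length)
        if guess = String.ofList [PySem.List.pyGetD secret_word.toList index ' '] then
          (st.1.set index.toNat guess, true)
        else st)
      (letters_guessed, false)
  -- `if not correct: wrong.append(guess)` mutates an argument only; return value unaffected
  st.2

-- ===== PORT B =====
def is_guess_in_word_alt (guess : String) (secret_word : String) (letters_guessed : List String) (wrong : List String) : Bool :=
  -- positions = {}; for i, ch in enumerate(secret_word): positions.setdefault(ch, []).append(i)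
  let positions : PySem.Dict String (List Int) :=
    (PySem.List.enumerate secret_word.toList 0).foldl
      (fun d p => d.modify (String.ofList [p.2]) [] (fun l => l ++ [p.1]))
      PySem.Dict.empty
  -- hits = positions.get(guess, [])
  let hits := positions.getD guess []
  -- the marking pass and the possible `wrong.append(guess)` mutate arguments only
  let _marked := hits.foldl (fun lg i => lg.set i.toNat guess) letters_guessed
  -- return bool(hits)
  !hits.isEmpty

-- ===== PRECONDITION & SPEC =====
-- Pre_ excludes exactly the inputs where Python A (and B alike) raises IndexError on
-- `letters_guessed[index] = guess`: some matched position of secret_word lies beyond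
-- the end of letters_guessed.
def Pre_is_guess_in_word (guess : String) (secret_word : String) (letters_guessed : List String) (wrong : List String) : Prop :=
  ∀ k < secret_word.toList.length,
    String.ofList [secret_word.toList.getD k ' '] = guess → k < letters_guessed.length
instance (guess : String) (secret_word : String) (letters_guessed : List String) (wrong : List String) : Decidable (Pre_is_guess_in_word guess secret_word letters_guessed wrong) := by unfold Pre_is_guess_in_word; infer_instance
def pvWitness_is_guess_in_word : String × String × List String × List String := ("a", "abc", ["_", "_", "_"], [])

def Spec_is_guess_in_word (guess : String) (secret_word : String) (letters_guessed : List String) (wrong : List String) (out : Bool) : Prop := out = is_guess_in_word_alt guess secret_word letters_guessed wrong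
instance (guess : String) (secret_word : String) (letters_guessed : List String) (wrong : List String) (out : Bool) : Decidable (Spec_is_guess_in_word guess secret_word letters_guessed wrong out) := by unfold Spec_is_guess_in_word; infer_instance

-- ===== CLAIM (what is proved, stated in full; the proofs are below) =====
def Claim_equal_is_guess_in_word : Prop := ∀ (guess : String) (secret_word : String) (letters_guessed : List String) (wrong : List String), Dom_is_guess_in_word guess secret_word letters_guessed wrong → Pre_is_guess_in_word guess secret_word letters_guessed wrong → Spec_is_guess_in_word guess secret_word letters_guessed wrong (is_guess_in_word guess secret_word letters_guessed wrong)

-- ===== LEMMAS AND PROOFS =====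

-- A's fold flag: it ends true iff the condition holds somewhere in the index list,
-- regardless of the `letters_guessed` component.
theorem pv_flag_foldl (guess : String) (f : Int → String) (g : List String → Int → List String)
    (L : List Int) (lg : List String) (c : Bool) :
    (L.foldl (fun (st : List String × Bool) index =>
        if guess = f index then (g st.1 index, true) else st) (lg, c)).2
      = (c || L.any (fun index => guess = f index)) := by
  induction L generalizing lg c with
  | nil => simp
  | cons i L ih =>
    simp only [List.foldl_cons]
    split_ifs with h <;> rw [ih] <;> simp [h]

-- B's grouping fold: the entry looked up at g collects, in order, the first components of
-- the pairs whose character maps to g (on top of whatever the accumulator already held).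
theorem pv_group_getD (g : String) (L : List (Int × Char)) (d : PySem.Dict String (List Int)) :
    (L.foldl (fun d p => d.modify (String.ofList [p.2]) [] (fun l => l ++ [p.1])) d).getD g []
      = d.getD g [] ++ (L.filter (fun p => String.ofList [p.2] == g)).map (·.1) := by
  induction L generalizing d with
  | nil => simp
  | cons p L ih =>
    simp only [List.foldl_cons, List.filter_cons]
    rw [ih]
    by_cases h : g = String.ofList [p.2]
    · rw [PySem.Dict.getD_modify]
      simp [h, List.append_assoc]
    · rw [PySem.Dict.getD_modify]
      have h' : (String.ofList [p.2] == g) = false := by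
        simp [Ne.symm h]
      simp [h, h']

-- a filtered list is nonempty exactly when some element satisfies the predicate
theorem pv_not_isEmpty_filter {α : Type} (p : α → Bool) (L : List α) :
    (!(L.filter p).isEmpty) = L.any p := by
  induction L with
  | nil => simp
  | cons x L ih =>
    simp only [List.filter_cons, List.any_cons]
    cases h : p x <;> simp [h, ih]

-- the match test over enumerate depends on the character only
theorem pv_any_enumerate (g : String) (xs : List Char) (s : Int) :
    ((PySem.List.enumerate xs s).any (fun p => String.ofList [p.2] == g))
      = xs.any (fun c => String.ofList [c] == g) := by
  induction xs generalizing s with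
  | nil => simp [PySem.List.enumerate_nil]
  | cons x xs ih => simp [PySem.List.enumerate_cons, ih]

-- ===== VERDICT (by name: the statement is the Claim_ definition above) =====
theorem is_guess_in_word_spec : Claim_equal_is_guess_in_word := by
  intro guess secret_word letters_guessed wrong _ _
  unfold Spec_is_guess_in_word is_guess_in_word is_guess_in_word_alt
  simp only []
  rw [pv_flag_foldl guess (fun index => String.ofList [PySem.List.pyGetD secret_word.toList index ' '])
      (fun lg index => lg.set index.toNat guess)]
  rw [Bool.false_or]
  rw [pv_group_getD, PySem.Dict.getD_empty, List.nil_append, List.isEmpty_map,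
      pv_not_isEmpty_filter, pv_any_enumerate]
  rw [show PySem.Str.len secret_word = (secret_word.toList.length : Int) by
        simp [PySem.Str.len_eq]]
  conv_rhs => rw [← PySem.List.map_pyGetD_pyRange_zero' (xs := secret_word.toList) (d := ' ')]
  rw [List.any_map]
  refine congrArg _ ?_
  funext j
  simp only [Function.comp_apply, beq_iff_eq]
  exact decide_eq_decide.mpr eq_comm
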